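-- pv_equiv track=rewrite | github.com/AhmadEdisonTrg/Project-Python | genAlgo.py | choose_parent
-- ===== SOURCE A (Python) =====
-- import math
--
-- def choose_parent(pop,fit):
--     sorted_pop = []
--     parent=[]
--     smallest_att=min(fit)
--
--     # Sorting the pop by it fittest value from best selection to bad one, so that make it easier to choose parent
--     while(len(sorted_pop)<len(pop)):
--         for idx,i in enumerate(fit) :
--             if (i == smallest_att)and(len(sorted_pop)<len(pop)):
--                 sorted_pop.append(pop[idx])
--         smallest_att+=1
--     # Then pick the parent by this patern [1]x[2];[2]x[3];[3]x[4];...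
--     for i in range(math.ceil(len(sorted_pop)/2)):
--         parent.append(sorted_pop[i])
--         parent.append(sorted_pop[i+1])
--     return parent
-- ===== SOURCE B (Python) =====
-- def choose_parent(pop, fit):
--     # Group individuals by fitness in one pass, then concatenate buckets in
--     # ascending fitness order (sorted distinct keys) instead of A's rescans.
--     buckets = {}
--     for v, p in zip(fit, pop):
--         buckets.setdefault(v, []).append(p)
--     sorted_pop = []
--     for v in sorted(buckets):
--         sorted_pop.extend(buckets[v])
--     parent = []
--     for i in range((len(sorted_pop) + 1) // 2):
--         parent.append(sorted_pop[i])
--         parent.append(sorted_pop[i + 1])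
--     return parent
-- ===== Notes on version B (the rewrite author's own statement) =====
-- stated objective: faster
-- what changed: A counting-sorts by re-scanning the whole fit list once per candidate fitness value from min(fit) upward; B groups the individuals into fitness buckets in one zip pass and concatenates the buckets over the sorted distinct keys, keeping A's overlapping pairing loop.
import Mathlib
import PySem

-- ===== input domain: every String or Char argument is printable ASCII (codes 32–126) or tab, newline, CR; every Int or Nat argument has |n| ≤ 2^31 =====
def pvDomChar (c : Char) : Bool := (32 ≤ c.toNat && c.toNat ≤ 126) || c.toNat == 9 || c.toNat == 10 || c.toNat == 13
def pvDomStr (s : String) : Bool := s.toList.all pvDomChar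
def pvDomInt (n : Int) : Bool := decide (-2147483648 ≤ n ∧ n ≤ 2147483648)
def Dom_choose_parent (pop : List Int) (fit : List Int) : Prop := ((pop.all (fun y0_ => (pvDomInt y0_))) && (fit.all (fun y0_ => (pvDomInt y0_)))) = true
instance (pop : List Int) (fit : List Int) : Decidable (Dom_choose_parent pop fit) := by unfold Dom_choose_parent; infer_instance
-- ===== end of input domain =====

-- B replaces A's per-value rescans of fit (a counting sort by repeated full scans) with one
-- bucket-grouping pass over zip(fit, pop) plus a sweep over the sorted distinct keys; objective: faster.

-- ===== PORT A =====
-- inner 'for idx,i in enumerate(fit)' pass of A's while-loop (pop[idx] is read only when the guard holds;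
-- under Pre_ every such read is in range, so pyGetD is exact there)
def chooseParentPass (pop fit : List Int) (v : Int) (s : List Int) : List Int :=
  (PySem.List.enumerate fit).foldl
    (fun s p => if p.2 = v ∧ s.length < pop.length then s ++ [PySem.List.pyGetD pop p.1 0] else s) s

-- A's while-loop; the fuel argument is a termination bound only (under Pre_ the loop makes at most max-min+1 passes)
def chooseParentLoop (pop fit : List Int) : Nat → Int → List Int → List Int
  | 0, _, s => s
  | n+1, v, s =>
      if s.length < pop.length then chooseParentLoop pop fit n (v + 1) (chooseParentPass pop fit v s)
      else s

-- the pairing loop 'for i in range(math.ceil(len(s)/2))' — the SAME Python text in A and B, so one shared helper;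
-- math.ceil(len(s)/2) = (len(s)+1)/2 on Nat (s[i+1] is in range under Pre_, so pyGetD is exact there)
def chooseParentPair (s : List Int) : List Int :=
  (PySem.List.pyRange 0 (((s.length + 1) / 2 : Nat) : Int) 1).foldl
    (fun p i => p ++ [PySem.List.pyGetD s i 0, PySem.List.pyGetD s (i + 1) 0]) []

def choose_parent (pop : List Int) (fit : List Int) : List Int :=
  -- min(fit): Python raises ValueError on empty fit; Pre_ excludes that, so .getD 0 is never the value used
  let smallest := (PySem.List.min? fit (fun x => x)).getD 0
  let fuel := (((PySem.List.max? fit (fun x => x)).getD 0) - smallest).toNat + 1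
  let sorted_pop := chooseParentLoop pop fit fuel smallest []
  chooseParentPair sorted_pop

-- ===== PORT B =====
-- buckets: one pass over zip(fit, pop); buckets.setdefault(v, []).append(p) is Dict.modify v [] (· ++ [p])
def chooseParentBuckets (pop fit : List Int) : PySem.Dict Int (List Int) :=
  (fit.zip pop).foldl
    (fun d q => PySem.Dict.modify d q.1 [] (fun xs => xs ++ [q.2]))
    PySem.Dict.empty

def choose_parent_alt (pop : List Int) (fit : List Int) : List Int :=
  let buckets := chooseParentBuckets pop fit
  -- 'for v in sorted(buckets)': the sorted key list; buckets[v] never raises (v is a key), so getD is exact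
  let sorted_pop := (PySem.List.sorted buckets.keys (fun x => x)).foldl
      (fun s v => s ++ buckets.getD v []) []
  chooseParentPair sorted_pop

-- ===== PRECONDITION & SPEC =====
-- Pre_ is exactly where the Python A returns normally: nonempty fit (else min raises ValueError), not a
-- singleton population (pairing raises IndexError), fit at least as long as pop (else the while-loop never
-- fills sorted_pop and diverges), and no surplus fit entry smaller than a paired one (else pop[idx] raises
-- IndexError during the counting passes).
def Pre_choose_parent (pop : List Int) (fit : List Int) : Prop :=
  fit ≠ [] ∧ pop.length ≠ 1 ∧ pop.length ≤ fit.length ∧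
  ∀ x ∈ fit.take pop.length, ∀ y ∈ fit.drop pop.length, x ≤ y
instance (pop : List Int) (fit : List Int) : Decidable (Pre_choose_parent pop fit) := by
  unfold Pre_choose_parent; infer_instance

def pvWitness_choose_parent : List Int × List Int := ([10, 20, 30], [5, 3, 5])

def Spec_choose_parent (pop : List Int) (fit : List Int) (out : List Int) : Prop := out = choose_parent_alt pop fit
instance (pop : List Int) (fit : List Int) (out : List Int) : Decidable (Spec_choose_parent pop fit out) := by unfold Spec_choose_parent; infer_instance

-- ===== CLAIM (what is proved, stated in full; the proofs are below) =====
def Claim_equal_choose_parent : Prop := ∀ (pop : List Int) (fit : List Int), Dom_choose_parent pop fit → Pre_choose_parent pop fit → Spec_choose_parent pop fit (choose_parent pop fit)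

-- ===== LEMMAS AND PROOFS =====

-- the pop-elements whose fit value is v, in position order (z = fit.zip pop)
def pvSel (z : List (Int × Int)) (v : Int) : List Int :=
  (z.filter (fun p => p.1 == v)).map (fun x => x.2)

-- concatenation of the buckets for values lo, lo+1, …, lo+t-1
def pvAccum (z : List (Int × Int)) (lo : Int) (t : Nat) : List Int :=
  (List.range t).flatMap (fun j : Nat => pvSel z (lo + (j : Int)))

theorem pv_zip_take {α β : Type} : ∀ (l₁ : List α) (l₂ : List β),
    (l₁.take l₂.length).zip l₂ = l₁.zip l₂ := by
  intro l₁
  induction l₁ with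
  | nil => intro l₂; simp
  | cons a l ih =>
      intro l₂
      cases l₂ with
      | nil => simp
      | cons b l₂ => simp [List.take_succ_cons, ih l₂]

theorem pv_pass_aux (pop : List Int) (v : Int) :
    ∀ (l : List Int) (k : Nat) (s : List Int), k + l.length ≤ pop.length →
      s.length + (l.zip (pop.drop k)).countP (fun p => p.1 == v) ≤ pop.length →
      (PySem.List.enumerate l (k : Int)).foldl
          (fun s p => if p.2 = v ∧ s.length < pop.length then s ++ [PySem.List.pyGetD pop p.1 0] else s) s
        = s ++ pvSel (l.zip (pop.drop k)) v := by
  intro l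
  induction l with
  | nil => intro k s _ _; simp [PySem.List.enumerate_nil, pvSel]
  | cons a l ih =>
      intro k s hk hcnt
      have hklt : k < pop.length := by simp at hk; omega
      have hdrop : pop.drop k = pop[k] :: pop.drop (k + 1) := (List.getElem_cons_drop hklt).symm
      rw [hdrop] at hcnt ⊢
      rw [List.zip_cons_cons] at hcnt
      rw [PySem.List.enumerate_cons, List.zip_cons_cons]
      have hcast : ((k : Int) + 1) = ((k + 1 : Nat) : Int) := by push_cast; ring
      have hget : PySem.List.pyGetD pop (k : Int) 0 = pop[k] := by
        simp [PySem.List.pyGetD_natCast, List.getD_eq_getElem?_getD, hklt]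
      by_cases hav : a = v
      · have hc1 : ((a, pop[k]) :: l.zip (List.drop (k + 1) pop)).countP (fun p => p.1 == v)
            = (l.zip (List.drop (k + 1) pop)).countP (fun p => p.1 == v) + 1 := by
          simp [hav]
        rw [hc1] at hcnt
        have hlt : s.length < pop.length := by omega
        simp only [List.foldl_cons, if_pos (And.intro hav hlt), hget, hcast]
        rw [ih (k + 1) (s ++ [pop[k]]) (by simp at hk ⊢; omega) (by simp; omega)]
        simp [pvSel, hav]
      · have hc1 : ((a, pop[k]) :: l.zip (List.drop (k + 1) pop)).countP (fun p => p.1 == v)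
            = (l.zip (List.drop (k + 1) pop)).countP (fun p => p.1 == v) := by
          simp [hav]
        rw [hc1] at hcnt
        have hif : ¬ (a = v ∧ s.length < pop.length) := fun h => hav h.1
        simp only [List.foldl_cons, if_neg hif, hcast]
        rw [ih (k + 1) s (by simp at hk ⊢; omega) hcnt]
        simp [pvSel, hav]

-- a pass appends nothing once sorted_pop is full (the guard's second conjunct is false throughout)
theorem pv_pass_noop_full (pop : List Int) (v : Int) :
    ∀ (l : List Int) (k : Int) (s : List Int), pop.length ≤ s.length →
      (PySem.List.enumerate l k).foldl
          (fun s p => if p.2 = v ∧ s.length < pop.length then s ++ [PySem.List.pyGetD pop p.1 0] else s) s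
        = s := by
  intro l
  induction l with
  | nil => intro k s _; simp [PySem.List.enumerate_nil]
  | cons a l ih =>
      intro k s hfull
      rw [PySem.List.enumerate_cons]
      have hif : ¬ (a = v ∧ s.length < pop.length) := fun h => absurd h.2 (by omega)
      simp only [List.foldl_cons, if_neg hif]
      exact ih (k + 1) s hfull

-- a pass appends nothing when no scanned element carries the pass value
theorem pv_pass_noop_absent (pop : List Int) (v : Int) :
    ∀ (l : List Int) (k : Int) (s : List Int), (∀ x ∈ l, x ≠ v) →
      (PySem.List.enumerate l k).foldl
          (fun s p => if p.2 = v ∧ s.length < pop.length then s ++ [PySem.List.pyGetD pop p.1 0] else s) s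
        = s := by
  intro l
  induction l with
  | nil => intro k s _; simp [PySem.List.enumerate_nil]
  | cons a l ih =>
      intro k s habs
      rw [PySem.List.enumerate_cons]
      have hif : ¬ (a = v ∧ s.length < pop.length) := fun h => habs a (by simp) h.1
      simp only [List.foldl_cons, if_neg hif]
      exact ih (k + 1) s (fun x hx => habs x (by simp [hx]))

theorem pv_countP_lt_succ (z : List (Int × Int)) (c : Int) :
    z.countP (fun p => decide (p.1 < c + 1))
      = z.countP (fun p => decide (p.1 < c)) + z.countP (fun p => p.1 == c) := by
  induction z with
  | nil => simp
  | cons a z ih =>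
      simp only [List.countP_cons, ih]
      by_cases h1 : a.1 < c
      · have h2 : a.1 < c + 1 := by omega
        have h3 : ¬ a.1 = c := by omega
        simp [h1, h2, h3]
        omega
      · by_cases h4 : a.1 = c
        · simp [h4]
          omega
        · have h5 : ¬ a.1 < c + 1 := by omega
          simp [h1, h4, h5]

theorem pv_length_pvSel (z : List (Int × Int)) (v : Int) :
    (pvSel z v).length = z.countP (fun p => p.1 == v) := by
  simp [pvSel, List.countP_eq_length_filter]

theorem pv_length_pvAccum (z : List (Int × Int)) (lo : Int) (hlo : ∀ p ∈ z, lo ≤ p.1) :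
    ∀ t : Nat, (pvAccum z lo t).length = z.countP (fun p => decide (p.1 < lo + (t : Int))) := by
  intro t
  induction t with
  | zero =>
      have h0 : pvAccum z lo 0 = [] := by simp [pvAccum]
      rw [h0]
      symm
      simp only [List.length_nil, Nat.cast_zero, add_zero]
      rw [List.countP_eq_zero]
      intro p hp
      simp
      exact hlo p hp
  | succ t ih =>
      have hsplit : pvAccum z lo (t + 1) = pvAccum z lo t ++ pvSel z (lo + (t : Int)) := by
        simp [pvAccum, List.range_succ]
      rw [hsplit, List.length_append, ih, pv_length_pvSel]
      rw [show lo + ((t + 1 : Nat) : Int) = (lo + (t : Int)) + 1 by push_cast; ring]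
      rw [pv_countP_lt_succ]

theorem pv_pvSel_nil (z : List (Int × Int)) (v : Int) (h : ∀ p ∈ z, p.1 ≠ v) :
    pvSel z v = [] := by
  simp only [pvSel, List.map_eq_nil_iff, List.filter_eq_nil_iff]
  intro p hp
  simp [h p hp]

theorem pv_pvAccum_stable (z : List (Int × Int)) (lo : Int) (T : Nat)
    (hT : ∀ p ∈ z, p.1 < lo + (T : Int)) :
    ∀ t : Nat, T ≤ t → pvAccum z lo t = pvAccum z lo T := by
  intro t
  induction t with
  | zero => intro h; rw [Nat.le_zero.mp h]
  | succ t ih =>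
      intro h
      rcases Nat.lt_or_ge T (t + 1) with hlt | hge
      · have hTt : T ≤ t := by omega
        have hsplit : pvAccum z lo (t + 1) = pvAccum z lo t ++ pvSel z (lo + (t : Int)) := by
          simp [pvAccum, List.range_succ]
        rw [hsplit, ih hTt, pv_pvSel_nil]
        · simp
        · intro p hp
          have h1 := hT p hp
          have h2 : (T : Int) ≤ (t : Int) := by exact_mod_cast hTt
          omega
      · have hTe : T = t + 1 := by omega
        rw [hTe]

theorem pv_loop_main (pop fit : List Int) (lo hi : Int)
    (hple : pop.length ≤ fit.length)
    (hlo : ∀ p ∈ fit.zip pop, lo ≤ p.1) (hhi : ∀ p ∈ fit.zip pop, p.1 ≤ hi)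
    (hmem : ∃ p ∈ fit.zip pop, p.1 = hi)
    (hsuffix : ∀ y ∈ fit.drop pop.length, hi ≤ y) :
    ∀ (n t : Nat), hi < lo + (t : Int) + (n : Int) →
      chooseParentLoop pop fit n (lo + (t : Int)) (pvAccum (fit.zip pop) lo t)
        = pvAccum (fit.zip pop) lo (hi + 1 - lo).toNat := by
  obtain ⟨q, hqmem, hq1⟩ := hmem
  have hlohi : lo ≤ hi := hq1 ▸ hlo q hqmem
  have hzlen : (fit.zip pop).length = pop.length := by
    rw [List.length_zip]; omega
  have hTval : lo + (((hi + 1 - lo).toNat : Nat) : Int) = hi + 1 := by omega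
  have hstableT : ∀ p ∈ fit.zip pop, p.1 < lo + (((hi + 1 - lo).toNat : Nat) : Int) := by
    intro p hp; rw [hTval]; have := hhi p hp; omega
  intro n
  induction n with
  | zero =>
      intro t hfuel
      simp only [Nat.cast_zero, add_zero] at hfuel
      have hTt : (hi + 1 - lo).toNat ≤ t := by omega
      simp only [chooseParentLoop]
      exact pv_pvAccum_stable _ lo _ hstableT t hTt
  | succ n ih =>
      intro t hfuel
      simp only [chooseParentLoop]
      by_cases hcase : hi < lo + (t : Int)
      · have hall : ∀ p ∈ fit.zip pop, p.1 < lo + (t : Int) := by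
          intro p hp; have := hhi p hp; omega
        have hfull : (pvAccum (fit.zip pop) lo t).length = pop.length := by
          rw [pv_length_pvAccum _ _ hlo, ← hzlen]
          exact List.countP_eq_length.mpr (fun p hp => by simp [hall p hp])
        rw [if_neg (by omega)]
        exact pv_pvAccum_stable _ lo _ hstableT t (by omega)
      · have hnotlt : ¬ q.1 < lo + (t : Int) := by omega
        have hle : (pvAccum (fit.zip pop) lo t).length < pop.length := by
          rw [pv_length_pvAccum _ _ hlo, ← hzlen]
          refine lt_of_le_of_ne List.countP_le_length (fun hc => ?_)
          have := (List.countP_eq_length.mp hc) q hqmem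
          simp at this
          omega
        rw [if_pos hle]
        have hcnt : (pvAccum (fit.zip pop) lo t).length
            + ((fit.zip pop).countP (fun p => p.1 == lo + (t : Int))) ≤ pop.length := by
          rw [pv_length_pvAccum _ _ hlo, ← hzlen]
          calc (fit.zip pop).countP (fun p => decide (p.1 < lo + (t : Int)))
                + (fit.zip pop).countP (fun p => p.1 == lo + (t : Int))
              = (fit.zip pop).countP (fun p => decide (p.1 < lo + (t : Int) + 1)) :=
                (pv_countP_lt_succ _ _).symm
            _ ≤ (fit.zip pop).length := List.countP_le_length
        have hplen : (fit.take pop.length).length = pop.length := by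
          rw [List.length_take]; omega
        have hzip : (fit.take pop.length).zip pop = fit.zip pop := pv_zip_take fit pop
        have hpass : chooseParentPass pop fit (lo + (t : Int)) (pvAccum (fit.zip pop) lo t)
            = pvAccum (fit.zip pop) lo (t + 1) := by
          unfold chooseParentPass
          have h0 := pv_pass_aux pop (lo + (t : Int)) (fit.take pop.length) 0
            (pvAccum (fit.zip pop) lo t) (by omega)
            (by simpa [hzip] using hcnt)
          simp only [Nat.cast_zero, List.drop_zero, hzip] at h0
          have hsplitfit : PySem.List.enumerate fit (0 : Int)
              = PySem.List.enumerate (fit.take pop.length) (0 : Int)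
                ++ PySem.List.enumerate (fit.drop pop.length)
                    ((0 : Int) + ((fit.take pop.length).length : Int)) := by
            conv_lhs => rw [show fit = fit.take pop.length ++ fit.drop pop.length from
              (List.take_append_drop _ _).symm]
            rw [PySem.List.enumerate_append]
          rw [show PySem.List.enumerate fit = PySem.List.enumerate fit (0 : Int) from rfl,
            hsplitfit, List.foldl_append, h0]
          have hnoop : (PySem.List.enumerate (fit.drop pop.length)
                ((0 : Int) + ((fit.take pop.length).length : Int))).foldl
              (fun s p => if p.2 = lo + (t : Int) ∧ s.length < pop.length
                then s ++ [PySem.List.pyGetD pop p.1 0] else s)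
              (pvAccum (fit.zip pop) lo t ++ pvSel (fit.zip pop) (lo + (t : Int)))
              = pvAccum (fit.zip pop) lo t ++ pvSel (fit.zip pop) (lo + (t : Int)) := by
            by_cases hex : ∃ y ∈ fit.drop pop.length, y = lo + (t : Int)
            · obtain ⟨y, hy, hyv⟩ := hex
              have hihi : lo + (t : Int) = hi := le_antisymm (by omega) (hyv ▸ hsuffix y hy)
              apply pv_pass_noop_full
              have hlen1 : (pvAccum (fit.zip pop) lo t ++ pvSel (fit.zip pop) (lo + (t : Int))).length
                  = (fit.zip pop).countP (fun p => decide (p.1 < lo + (t : Int) + 1)) := by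
                rw [List.length_append, pv_length_pvAccum _ _ hlo, pv_length_pvSel,
                  pv_countP_lt_succ]
              rw [hlen1, ← hzlen]
              refine le_of_eq (List.countP_eq_length.mpr ?_).symm
              intro p hp
              have := hhi p hp
              simp
              omega
            · exact pv_pass_noop_absent pop (lo + (t : Int)) _ _ _
                (fun y hy hyv => hex ⟨y, hy, hyv⟩)
          rw [hnoop]
          simp [pvAccum, List.range_succ]
        rw [hpass]
        have hcast : lo + (t : Int) + 1 = lo + ((t + 1 : Nat) : Int) := by push_cast; ring
        rw [hcast]
        exact ih (t + 1) (by push_cast at hfuel ⊢; omega)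

theorem pv_buckets_getD (pop fit : List Int) (v : Int) :
    (chooseParentBuckets pop fit).getD v [] = pvSel (fit.zip pop) v := by
  unfold chooseParentBuckets
  rw [PySem.Dict.getD_foldl_modify_append]
  rfl

theorem pv_buckets_keys (pop fit : List Int) :
    (chooseParentBuckets pop fit).keys = PySem.Set.ofList ((fit.zip pop).map Prod.fst) := by
  unfold chooseParentBuckets
  rw [PySem.Dict.keys_foldl_modify_key (fit.zip pop) Prod.fst []
    (fun _ q => fun xs => xs ++ [q.2]) PySem.Dict.empty]
  rw [show (PySem.Dict.empty : PySem.Dict Int (List Int)).keys = [] from rfl]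
  exact PySem.Set.update_nil_left _

theorem pv_flatMap_filter (z : List (Int × Int)) :
    ∀ R : List Int,
      R.flatMap (fun v => pvSel z v)
        = (R.filter (fun v => decide (v ∈ (z.map Prod.fst)))).flatMap (fun v => pvSel z v) := by
  intro R
  induction R with
  | nil => simp
  | cons v R ih =>
      by_cases hv : v ∈ z.map Prod.fst
      · simp [hv, ih]
      · have hnil : pvSel z v = [] := by
          apply pv_pvSel_nil
          intro p hp hpv
          exact hv (hpv ▸ List.mem_map_of_mem hp)
        simp [hv, hnil, ih]

theorem pv_sortedB (pop fit : List Int) (lo hi : Int)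
    (hlo : ∀ p ∈ fit.zip pop, lo ≤ p.1) (hhi : ∀ p ∈ fit.zip pop, p.1 ≤ hi) :
    (PySem.List.sorted ((chooseParentBuckets pop fit).keys) (fun x => x)).foldl
        (fun s v => s ++ (chooseParentBuckets pop fit).getD v []) []
      = pvAccum (fit.zip pop) lo (hi + 1 - lo).toNat := by
  have hfold : ∀ K : List Int,
      K.foldl (fun s v => s ++ (chooseParentBuckets pop fit).getD v []) []
        = K.flatMap (fun v => pvSel (fit.zip pop) v) := by
    intro K
    rw [PySem.List.foldl_append_eq_flatMap (fun v => (chooseParentBuckets pop fit).getD v []) K []]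
    simp only [List.nil_append, pv_buckets_getD]
  rw [hfold]
  have haccum : pvAccum (fit.zip pop) lo (hi + 1 - lo).toNat
      = ((List.range (hi + 1 - lo).toNat).map (fun j : Nat => lo + (j : Int))).flatMap
          (fun v => pvSel (fit.zip pop) v) := by
    rw [List.flatMap_map]
    rfl
  set fsts : List Int := (fit.zip pop).map Prod.fst with hfsts
  set R : List Int := (List.range (hi + 1 - lo).toNat).map (fun j : Nat => lo + (j : Int)) with hR
  set F : List Int := R.filter (fun v => decide (v ∈ fsts)) with hF
  have hRpw : R.Pairwise (· < ·) := by
    rw [hR]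
    exact (List.pairwise_lt_range).map _ (fun a b hab => by omega)
  have hFsub : F.Sublist R := List.filter_sublist
  have hFpw : F.Pairwise (· < ·) := hRpw.sublist hFsub
  have hFnodup : F.Nodup := hFpw.imp (fun h => ne_of_lt h)
  have hmemR : ∀ v ∈ fsts, v ∈ R := by
    intro v hv
    obtain ⟨p, hp, hpv⟩ := List.mem_map.mp hv
    have h1 : lo ≤ v := hpv ▸ hlo p hp
    have h2 : v ≤ hi := hpv ▸ hhi p hp
    rw [hR, List.mem_map]
    exact ⟨(v - lo).toNat, List.mem_range.mpr (by omega), by omega⟩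
  have hmemF : ∀ v, v ∈ F ↔ v ∈ PySem.Set.ofList fsts := by
    intro v
    rw [hF, List.mem_filter, PySem.Set.mem_ofList]
    constructor
    · rintro ⟨_, h⟩; exact of_decide_eq_true h
    · intro h; exact ⟨hmemR v h, decide_eq_true h⟩
  have hperm : F.Perm (PySem.Set.ofList fsts) :=
    (List.perm_ext_iff_of_nodup hFnodup (PySem.Set.nodup_ofList _)).mpr hmemF
  have hK : PySem.List.sorted (PySem.Set.ofList fsts) (fun x => x) = F :=
    PySem.List.sorted_eq_of_perm_of_pairwise_lt _ _ _ hperm hFpw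
  rw [pv_buckets_keys, hK, haccum]
  conv_rhs => rw [pv_flatMap_filter (fit.zip pop) R]

-- ===== VERDICT (by name: the statement is the Claim_ definition above) =====
theorem choose_parent_spec : Claim_equal_choose_parent := by
  intro pop fit _ hpre
  obtain ⟨hfitne, hn1, hple, hband⟩ := hpre
  unfold Spec_choose_parent
  by_cases hpop : pop = []
  · subst hpop
    simp [choose_parent, choose_parent_alt, chooseParentLoop, chooseParentBuckets,
      List.zip_nil_right, PySem.List.sorted, PySem.Dict.keys, PySem.Dict.empty]
  · obtain ⟨lo, hlo⟩ : ∃ lo, PySem.List.min? fit (fun x => x) = some lo := by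
      cases h : PySem.List.min? fit (fun x => x) with
      | none => exact absurd ((PySem.List.min?_eq_none_iff _ _).mp h) hfitne
      | some m => exact ⟨m, rfl⟩
    obtain ⟨M, hM⟩ : ∃ M, PySem.List.max? fit (fun x => x) = some M := by
      cases h : PySem.List.max? fit (fun x => x) with
      | none => exact absurd ((PySem.List.max?_eq_none_iff _ _).mp h) hfitne
      | some m => exact ⟨m, rfl⟩
    have hplen : (fit.take pop.length).length = pop.length := by
      rw [List.length_take]; omega
    have hfitpne : fit.take pop.length ≠ [] := by
      intro h
      rw [h] at hplen
      exact hpop (List.length_eq_zero_iff.mp (by simpa using hplen.symm))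
    obtain ⟨hi, hhi⟩ : ∃ hi, PySem.List.max? (fit.take pop.length) (fun x => x) = some hi := by
      cases h : PySem.List.max? (fit.take pop.length) (fun x => x) with
      | none => exact absurd ((PySem.List.max?_eq_none_iff _ _).mp h) hfitpne
      | some m => exact ⟨m, rfl⟩
    have hzip : (fit.take pop.length).zip pop = fit.zip pop := pv_zip_take fit pop
    have hfst1 : ∀ p ∈ fit.zip pop, p.1 ∈ fit.take pop.length := by
      intro p hp
      rw [← hzip] at hp
      exact (List.of_mem_zip hp).1
    have hzlo : ∀ p ∈ fit.zip pop, lo ≤ p.1 := by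
      intro p hp
      exact PySem.List.min?_isMin hlo p.1 ((List.take_sublist _ _).mem (hfst1 p hp))
    have hzhi : ∀ p ∈ fit.zip pop, p.1 ≤ hi := by
      intro p hp
      exact PySem.List.max?_isMax hhi p.1 (hfst1 p hp)
    have hzmem : ∃ p ∈ fit.zip pop, p.1 = hi := by
      have hhimem : hi ∈ fit.take pop.length := PySem.List.max?_mem hhi
      have hfstmap : (fit.zip pop).map Prod.fst = fit.take pop.length := by
        rw [← hzip]
        exact List.map_fst_zip (le_of_eq hplen)
      rw [← hfstmap] at hhimem
      obtain ⟨p, hp, hpe⟩ := List.mem_map.mp hhimem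
      exact ⟨p, hp, hpe⟩
    have hsuffix : ∀ y ∈ fit.drop pop.length, hi ≤ y := by
      intro y hy
      exact hband hi (PySem.List.max?_mem hhi) y hy
    have hloM : lo ≤ M := by
      have hMmem : M ∈ fit := PySem.List.max?_mem hM
      exact PySem.List.min?_isMin hlo M hMmem
    have hhiM : hi ≤ M := by
      have hhimem : hi ∈ fit := (List.take_sublist _ _).mem (PySem.List.max?_mem hhi)
      exact PySem.List.max?_isMax hM hi hhimem
    have hlohi : lo ≤ hi := by
      obtain ⟨q, hq, hq1⟩ := hzmem
      have := hzlo q hq; omega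
    unfold choose_parent choose_parent_alt
    simp only [hlo, hM, Option.getD_some]
    congr 1
    have hA : chooseParentLoop pop fit ((M - lo).toNat + 1) lo []
        = pvAccum (fit.zip pop) lo (hi + 1 - lo).toNat := by
      have h := pv_loop_main pop fit lo hi hple hzlo hzhi hzmem hsuffix
        ((M - lo).toNat + 1) 0 (by push_cast; omega)
      simp only [Nat.cast_zero, add_zero] at h
      rw [show pvAccum (fit.zip pop) lo 0 = [] by simp [pvAccum]] at h
      exact h
    rw [hA, pv_sortedB pop fit lo hi hzlo hzhi]
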